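-- pv_equiv track=rewrite | github.com/vee1e/flare-floss | floss/string_decoder.py | memdiff_search
-- ===== SOURCE A (Python) =====
-- def memdiff_search(bytes1, bytes2):
--     """
--     Use binary searching to find the offset of the first difference
--      between two strings.
--
--     :param bytes1: The original sequence of bytes
--     :param bytes2: A sequence of bytes to compare with bytes1
--     :type bytes1: str
--     :type bytes2: str
--     :rtype: int offset of the first location a and b differ, None if strings match
--     """
--
--     # Prevent infinite recursion on inputs with length of one
--     half = (len(bytes1) // 2) or 1
--
--     # Compare first half of the string
--     if bytes1[:half] != bytes2[:half]:
--         # Have we found the first diff?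
--         if bytes1[0] != bytes2[0]:
--             return 0
--
--         return memdiff_search(bytes1[:half], bytes2[:half])
--
--     # Compare second half of the string
--     if bytes1[half:] != bytes2[half:]:
--         return memdiff_search(bytes1[half:], bytes2[half:]) + half
-- ===== SOURCE B (Python) =====
-- def memdiff_search(bytes1, bytes2):
--     """Linear scan: return the index of the first differing position, None if equal."""
--     for i in range(max(len(bytes1), len(bytes2))):
--         if bytes1[i] != bytes2[i]:
--             return i
-- ===== Notes on version B (the rewrite author's own statement) =====
-- stated objective: simpler
-- what changed: Replaced the halving binary recursion over string slices with a single linear index scan over range(max(len1,len2)) that returns the first index where the two strings differ.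
import Mathlib
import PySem

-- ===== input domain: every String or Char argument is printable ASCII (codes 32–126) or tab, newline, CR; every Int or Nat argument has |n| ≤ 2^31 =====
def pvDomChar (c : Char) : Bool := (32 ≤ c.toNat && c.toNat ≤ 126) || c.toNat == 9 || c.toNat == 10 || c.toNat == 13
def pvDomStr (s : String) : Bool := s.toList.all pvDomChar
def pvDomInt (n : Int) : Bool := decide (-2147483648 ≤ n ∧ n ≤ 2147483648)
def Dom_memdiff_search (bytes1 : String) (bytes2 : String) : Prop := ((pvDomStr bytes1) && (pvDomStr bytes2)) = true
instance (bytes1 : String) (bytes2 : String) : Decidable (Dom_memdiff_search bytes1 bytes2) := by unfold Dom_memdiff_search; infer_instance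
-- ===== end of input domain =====

-- B replaces A's halving binary recursion with a single linear scan for the first
-- differing index; objective: simpler. Pre_ excludes exactly the inputs on which A
-- raises IndexError (one string a strict extension of the other with equal common
-- prefix); B raises IndexError there too.


-- ===== PORT A =====
-- Literal port of A's binary recursion on the character lists.
-- half = (len(bytes1)//2) or 1  →  max (l.length / 2) 1  (len//2 is 0 iff it is falsy; Nat division
-- equals Python's floor division // here because both operands are nonnegative).
-- bytes1[:half] / bytes1[half:] with 0 ≤ half  →  List.take half / List.drop half (exact for
-- a nonnegative in-or-past-range slice bound).  bytes1[0] → PySem.List.pyGet? _ 0 (none =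
-- IndexError; the Option comparison below is only exact where both indexings succeed —
-- the raising inputs are excluded by Pre_).  In Python `recursion + half` would raise
-- TypeError if the recursion returned None; inside Pre_ it never does, ported as Option.map.
def memdiffA (l1 l2 : List Char) : Option Int :=
  let half := max (l1.length / 2) 1
  if l1.take half ≠ l2.take half then
    if PySem.List.pyGet? l1 0 ≠ PySem.List.pyGet? l2 0 then
      some 0
    else
      memdiffA (l1.take half) (l2.take half)
  else if l1.drop half ≠ l2.drop half then
    (memdiffA (l1.drop half) (l2.drop half)).map (fun r => r + (half : Int))
  else
    none
termination_by l1.length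
decreasing_by
  · -- first-half recursion: first characters agree but the halves differ, so l1.length ≥ 2
    rename_i hne heq
    have h2 : 2 ≤ l1.length := by
      by_contra h
      interval_cases hl : l1.length
      · have h0 : l1 = [] := List.length_eq_zero_iff.mp hl
        subst h0
        have h0 : l2 = [] := by
          cases l2 with
          | nil => rfl
          | cons c t => simp [PySem.List.pyGet?, PySem.List.pyIdx?] at heq
        subst h0
        exact hne rfl
      · obtain ⟨c, hc⟩ := List.length_eq_one_iff.mp hl
        subst hc
        cases l2 with
        | nil => simp [PySem.List.pyGet?, PySem.List.pyIdx?] at heq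
        | cons d t =>
          simp [PySem.List.pyGet?, PySem.List.pyIdx?] at heq
          subst heq
          exact hne (by rw [show half = 1 by simp [half]]; simp)
    simp only [List.length_take]
    omega
  · -- second-half recursion: the halves agree but the tails differ, so l1 ≠ []
    rename_i hne htl
    have h1 : l1 ≠ [] := by
      rintro rfl
      rw [show half = 1 by rfl] at hne htl
      cases l2 with
      | nil => exact htl rfl
      | cons d t => simp at hne
    have hpos : 0 < l1.length := List.length_pos_iff.mpr h1
    simp only [List.length_drop]
    omega

def memdiff_search (bytes1 : String) (bytes2 : String) : Option Int :=
  memdiffA bytes1.toList bytes2.toList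

-- ===== PORT B =====
-- Literal port of B: for i in range(max(len1, len2)): if bytes1[i] != bytes2[i]: return i.
-- bytes1[i] → PySem.List.pyGet? (none = IndexError, excluded by Pre_).
def memdiffScan (l1 l2 : List Char) (i n : Nat) : Option Int :=
  if i < n then
    if PySem.List.pyGet? l1 (i : Int) ≠ PySem.List.pyGet? l2 (i : Int) then
      some (i : Int)
    else
      memdiffScan l1 l2 (i + 1) n
  else
    none
termination_by n - i

def memdiff_search_alt (bytes1 : String) (bytes2 : String) : Option Int :=
  memdiffScan bytes1.toList bytes2.toList 0 (max bytes1.length bytes2.length)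

-- ===== PRECONDITION & SPEC =====
-- Pre_ excludes exactly the inputs on which Python A raises IndexError: pairs whose common
-- prefix is equal but whose lengths differ (one string strictly extends the other).
def Pre_memdiff_search (bytes1 : String) (bytes2 : String) : Prop :=
  bytes1 = bytes2 ∨
    ∃ i < min bytes1.toList.length bytes2.toList.length, bytes1.toList[i]? ≠ bytes2.toList[i]?
instance (bytes1 : String) (bytes2 : String) : Decidable (Pre_memdiff_search bytes1 bytes2) := by
  unfold Pre_memdiff_search; infer_instance

def pvWitness_memdiff_search : String × String := ("abcx", "abcy")

def Spec_memdiff_search (bytes1 : String) (bytes2 : String) (out : Option Int) : Prop := out = memdiff_search_alt bytes1 bytes2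
instance (bytes1 : String) (bytes2 : String) (out : Option Int) : Decidable (Spec_memdiff_search bytes1 bytes2 out) := by unfold Spec_memdiff_search; infer_instance

-- ===== CLAIM (what is proved, stated in full; the proofs are below) =====
def Claim_equal_memdiff_search : Prop := ∀ (bytes1 : String) (bytes2 : String), Dom_memdiff_search bytes1 bytes2 → Pre_memdiff_search bytes1 bytes2 → Spec_memdiff_search bytes1 bytes2 (memdiff_search bytes1 bytes2)

-- ===== LEMMAS AND PROOFS =====

theorem scan_none (l1 l2 : List Char) (i n : Nat)
    (h : ∀ j, i ≤ j → j < n → PySem.List.pyGet? l1 (j : Int) = PySem.List.pyGet? l2 (j : Int)) :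
    memdiffScan l1 l2 i n = none := by
  rw [memdiffScan]
  split_ifs with h1 h2
  · exact absurd (h i le_rfl h1) h2
  · exact scan_none l1 l2 (i + 1) n (fun j hj hjn => h j (by omega) hjn)
  · rfl
termination_by n - i

theorem scan_some (l1 l2 : List Char) (i n k : Nat)
    (hik : i ≤ k) (hkn : k < n)
    (hd : PySem.List.pyGet? l1 (k : Int) ≠ PySem.List.pyGet? l2 (k : Int))
    (hmin : ∀ j, i ≤ j → j < k → PySem.List.pyGet? l1 (j : Int) = PySem.List.pyGet? l2 (j : Int)) :
    memdiffScan l1 l2 i n = some (k : Int) := by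
  rw [memdiffScan]
  split_ifs with h1 h2
  · have : i = k := by
      by_contra hne
      exact h2 (hmin i le_rfl (by omega))
    rw [this]
  · have hik' : i + 1 ≤ k := by
      rcases Nat.lt_or_ge i k with h | h
      · omega
      · have he : i = k := Nat.le_antisymm hik h
        rw [he] at h2
        exact absurd (not_not.mp h2) hd
    exact scan_some l1 l2 (i + 1) n k hik' hkn hd (fun j hj hjk => hmin j (by omega) hjk)
  · omega
termination_by n - i

theorem pyget_zero (l : List Char) : PySem.List.pyGet? l (0 : Int) = l[0]? := by
  simpa using PySem.List.pyGet?_natCast l 0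

theorem memdiffA_none (l : List Char) : memdiffA l l = none := by
  rw [memdiffA]
  simp

theorem memdiffA_some (l1 l2 : List Char) (k : Nat)
    (hk1 : k < l1.length) (hk2 : k < l2.length)
    (hd : l1[k]? ≠ l2[k]?)
    (hmin : ∀ j, j < k → l1[j]? = l2[j]?) :
    memdiffA l1 l2 = some (k : Int) := by
  rw [memdiffA]
  have hhpos : 1 ≤ max (l1.length / 2) 1 := le_max_right _ _
  rcases Nat.lt_or_ge k (max (l1.length / 2) 1) with hcase | hcase
  · -- the difference lies in the first half: branch 1 is taken
    have htk : l1.take (max (l1.length / 2) 1) ≠ l2.take (max (l1.length / 2) 1) := by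
      intro he
      have := congrArg (fun l => l[k]?) he
      simp only [List.getElem?_take, if_pos hcase] at this
      exact hd this
    rw [if_pos htk]
    rcases Nat.eq_zero_or_pos k with rfl | hkpos
    · rw [if_pos (by simpa [pyget_zero] using hd)]
      norm_num
    · rw [if_neg (by simp [pyget_zero, hmin 0 hkpos])]
      have hlen2 : 2 ≤ l1.length := by omega
      have hhlt : max (l1.length / 2) 1 < l1.length := by omega
      apply memdiffA_some
      · simpa [List.length_take] using lt_min hcase hk1
      · simpa [List.length_take] using lt_min hcase hk2
      · simpa only [List.getElem?_take, if_pos hcase] using hd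
      · intro j hj
        simp only [List.getElem?_take, if_pos (lt_trans hj hcase)]
        exact hmin j hj
  · -- the first halves agree: branch 2 is taken
    have hte : l1.take (max (l1.length / 2) 1) = l2.take (max (l1.length / 2) 1) := by
      apply List.ext_getElem?
      intro j
      simp only [List.getElem?_take]
      split_ifs with hj
      · exact hmin j (by omega)
      · rfl
    rw [if_neg (by simp [hte])]
    have hdd : l1.drop (max (l1.length / 2) 1) ≠ l2.drop (max (l1.length / 2) 1) := by
      intro he
      have := congrArg (fun l => l[k - max (l1.length / 2) 1]?) he
      simp only [List.getElem?_drop] at this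
      rw [Nat.add_sub_cancel' hcase] at this
      exact hd this
    rw [if_pos hdd]
    have hrec : memdiffA (l1.drop (max (l1.length / 2) 1)) (l2.drop (max (l1.length / 2) 1))
        = some ((k - max (l1.length / 2) 1 : Nat) : Int) := by
      apply memdiffA_some
      · simp only [List.length_drop]; omega
      · simp only [List.length_drop]; omega
      · simp only [List.getElem?_drop]
        rw [Nat.add_sub_cancel' hcase]
        exact hd
      · intro j hj
        simp only [List.getElem?_drop]
        exact hmin _ (by omega)
    rw [hrec]
    simp only [Option.map_some]
    congr 1
    push_cast [Nat.cast_sub hcase]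
    ring
termination_by l1.length
decreasing_by
  all_goals simp only [List.length_take, List.length_drop]
  all_goals omega

-- ===== VERDICT (by name: the statement is the Claim_ definition above) =====
theorem memdiff_search_spec : Claim_equal_memdiff_search := by
  intro b1 b2 _ hpre
  unfold Spec_memdiff_search memdiff_search memdiff_search_alt
  rcases hpre with rfl | ⟨i, hi, hne⟩
  · rw [memdiffA_none]
    exact (scan_none _ _ _ _ (fun j _ _ => rfl)).symm
  · have hex : ∃ k, b1.toList[k]? ≠ b2.toList[k]? := ⟨i, hne⟩
    have hk := Nat.find_spec hex
    have hkle : Nat.find hex ≤ i := Nat.find_min' hex hne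
    have hmin : ∀ j, j < Nat.find hex → b1.toList[j]? = b2.toList[j]? :=
      fun j hj => not_not.mp (Nat.find_min hex hj)
    have hk1 : Nat.find hex < b1.toList.length := by omega
    have hk2 : Nat.find hex < b2.toList.length := by omega
    rw [memdiffA_some _ _ _ hk1 hk2 hk hmin]
    symm
    apply scan_some _ _ _ _ _ (Nat.zero_le _)
    · have : b1.length = b1.toList.length := by simp
      omega
    · simpa using hk
    · intro j _ hj
      simpa using hmin j hj
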